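-- pv_equiv track=rewrite | github.com/manwar/perlweeklychallenge-club | challenge-203/lubos-kolouch/python/ch-1.py | special_quadruplets
-- ===== SOURCE A (Python) =====
-- from collections.abc import Sequence
--
-- def special_quadruplets(nums: Sequence[int]) -> int:
--     """Count quadruplets a<b<c<d where nums[a]+nums[b]+nums[c] == nums[d]."""
--     n = len(nums)
--     if n < 4:
--         return 0
--
--     pair_counts: dict[int, int] = {}
--     total = 0
--
--     for c in range(2, n - 1):
--         b = c - 1
--         for a in range(0, b):
--             s = nums[a] + nums[b]
--             pair_counts[s] = pair_counts.get(s, 0) + 1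
--
--         for d in range(c + 1, n):
--             need = nums[d] - nums[c]
--             total += pair_counts.get(need, 0)
--
--     return total
-- ===== SOURCE B (Python) =====
-- def special_quadruplets(nums):
--     """Count quadruplets a<b<c<d where nums[a]+nums[b]+nums[c] == nums[d]."""
--     n = len(nums)
--     total = 0
--     for a in range(n):
--         for b in range(a + 1, n):
--             for c in range(b + 1, n):
--                 for d in range(c + 1, n):
--                     if nums[a] + nums[b] + nums[c] == nums[d]:
--                         total += 1
--     return total
-- ===== Notes on version B (the rewrite author's own statement) =====
-- stated objective: simpler
-- what changed: Replaced the incremental pair-sum hash table (dict of counts grown as c advances, queried for nums[d]-nums[c]) by the direct four-nested-loop brute force over all index quadruples a<b<c<d.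
import Mathlib
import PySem

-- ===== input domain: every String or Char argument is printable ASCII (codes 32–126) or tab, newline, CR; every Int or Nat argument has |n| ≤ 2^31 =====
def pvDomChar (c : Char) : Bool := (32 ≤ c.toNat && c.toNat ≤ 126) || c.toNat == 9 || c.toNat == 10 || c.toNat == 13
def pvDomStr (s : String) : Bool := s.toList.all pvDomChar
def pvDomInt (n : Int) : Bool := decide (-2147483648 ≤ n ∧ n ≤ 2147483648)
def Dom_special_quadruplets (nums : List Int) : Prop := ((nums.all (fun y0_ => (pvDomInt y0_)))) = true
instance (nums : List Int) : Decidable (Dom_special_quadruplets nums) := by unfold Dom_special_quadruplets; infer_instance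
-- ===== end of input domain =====

-- B replaces A's incremental pair-sum dictionary by the direct four-nested-loop brute force; objective: simpler.


-- ===== PORT A =====
def special_quadruplets (nums : List Int) : Int :=
  let n : Int := (nums.length : Int)
  if n < 4 then 0
  else
    let res := (PySem.List.pyRange 2 (n - 1)).foldl (fun (st : PySem.Dict Int Int × Int) c =>
      let b := c - 1
      let pc := (PySem.List.pyRange 0 b).foldl (fun pc a =>
        let s := PySem.List.pyGetD nums a 0 + PySem.List.pyGetD nums b 0
        pc.insert s (pc.getD s 0 + 1)) st.1
      let tot := (PySem.List.pyRange (c + 1) n).foldl (fun tot d =>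
        tot + pc.getD (PySem.List.pyGetD nums d 0 - PySem.List.pyGetD nums c 0) 0) st.2
      (pc, tot)) ((PySem.Dict.empty : PySem.Dict Int Int), (0 : Int))
    res.2

-- ===== PORT B =====
def special_quadruplets_alt (nums : List Int) : Int :=
  let n : Int := (nums.length : Int)
  (PySem.List.pyRange 0 n).foldl (fun tot a =>
    (PySem.List.pyRange (a + 1) n).foldl (fun tot b =>
      (PySem.List.pyRange (b + 1) n).foldl (fun tot c =>
        (PySem.List.pyRange (c + 1) n).foldl (fun tot d =>
          if PySem.List.pyGetD nums a 0 + PySem.List.pyGetD nums b 0 + PySem.List.pyGetD nums c 0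
              = PySem.List.pyGetD nums d 0 then tot + 1 else tot) tot) tot) tot) 0

-- ===== PRECONDITION & SPEC =====
def Spec_special_quadruplets (nums : List Int) (out : Int) : Prop := out = special_quadruplets_alt nums
instance (nums : List Int) (out : Int) : Decidable (Spec_special_quadruplets nums out) := by unfold Spec_special_quadruplets; infer_instance

-- ===== CLAIM (what is proved, stated in full; the proofs are below) =====
def Claim_equal_special_quadruplets : Prop := ∀ (nums : List Int), Dom_special_quadruplets nums → Spec_special_quadruplets nums (special_quadruplets nums)

-- ===== LEMMAS AND PROOFS =====

-- A's c-loop body, abstracted over the indexing function (definitionally the port's lambda at f = pyGetD nums · 0).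
def pvAstep (f : Int → Int) (n : Int) (st : PySem.Dict Int Int × Int) (c : Int) : PySem.Dict Int Int × Int :=
  let b := c - 1
  let pc := (PySem.List.pyRange 0 b).foldl (fun pc a =>
    let s := f a + f b
    pc.insert s (pc.getD s 0 + 1)) st.1
  let tot := (PySem.List.pyRange (c + 1) n).foldl (fun tot d =>
    tot + pc.getD (f d - f c) 0) st.2
  (pc, tot)

-- the multiset of pair sums f a + f b over 0 ≤ a < b < c (A's dictionary content)
def pvPairList (f : Int → Int) (c : Int) : List Int :=
  (PySem.List.pyRange 1 c).flatMap (fun b => (PySem.List.pyRange 0 b).map (fun a => f a + f b))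

-- the quadruple-condition indicator
def pvG4 (f : Int → Int) (a b c d : Int) : Int :=
  if a < b ∧ b < c ∧ c < d ∧ f a + f b + f c = f d then 1 else 0

-- the full-cube quadruple count, in A's (c,d,b,a) summation order
noncomputable def pvCube (f : Int → Int) (n : Int) : Int :=
  ∑ c ∈ Finset.Ico 0 n, ∑ d ∈ Finset.Ico 0 n, ∑ b ∈ Finset.Ico 0 n, ∑ a ∈ Finset.Ico 0 n,
    pvG4 f a b c d

lemma pyRange_one_empty {a b : Int} (h : b ≤ a) : PySem.List.pyRange a b = [] := by
  cases hE : PySem.List.pyRange a b with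
  | nil => rfl
  | cons x t =>
    exfalso
    have hx : x ∈ PySem.List.pyRange a b := by rw [hE]; exact List.mem_cons_self ..
    rw [PySem.List.mem_pyRange_one] at hx
    omega

lemma sum_map_pyRange (g : Int → Int) (lo hi : Int) :
    ((PySem.List.pyRange lo hi).map g).sum = ∑ y ∈ Finset.Ico lo hi, g y := by
  suffices H : ∀ (k : Nat) (lo : Int), (hi - lo).toNat = k →
      ((PySem.List.pyRange lo hi).map g).sum = ∑ y ∈ Finset.Ico lo hi, g y from H _ lo rfl
  intro k
  induction k with
  | zero =>
    intro lo h0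
    have hle : hi ≤ lo := by omega
    rw [pyRange_one_empty hle, Finset.Ico_eq_empty (by omega)]
    simp
  | succ k ih =>
    intro lo h0
    have hlt : lo < hi := by omega
    rw [PySem.List.pyRange_one_cons hlt, List.map_cons, List.sum_cons, ih (lo + 1) (by omega)]
    have hins : Finset.Ico lo hi = insert lo (Finset.Ico (lo + 1) hi) := by
      ext y; simp only [Finset.mem_insert, Finset.mem_Ico]; omega
    rw [hins, Finset.sum_insert (by simp only [Finset.mem_Ico]; omega)]

lemma countP_pyRange (p : Int → Prop) [DecidablePred p] (lo hi : Int) :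
    (((PySem.List.pyRange lo hi).countP (fun y => decide (p y)) : Nat) : Int)
      = ∑ y ∈ Finset.Ico lo hi, if p y then 1 else 0 := by
  rw [← PySem.List.sum_map_ite_one_zero (fun y => decide (p y)) (PySem.List.pyRange lo hi),
    sum_map_pyRange]
  exact Finset.sum_congr rfl fun y _ => by simp

lemma count_map_pyRange (g : Int → Int) (v lo hi : Int) :
    ((((PySem.List.pyRange lo hi).map g).count v : Nat) : Int)
      = ∑ y ∈ Finset.Ico lo hi, if g y = v then 1 else 0 := by
  have h1 : ((PySem.List.pyRange lo hi).map g).count v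
      = (PySem.List.pyRange lo hi).countP (fun y => decide (g y = v)) := by
    rw [List.count_eq_countP, List.countP_map]
    exact List.countP_congr fun y _ => by by_cases h : g y = v <;> simp [h]
  rw [h1, countP_pyRange (fun y => g y = v) lo hi]

lemma count_pvPairList (f : Int → Int) (c v : Int) :
    (((pvPairList f c).count v : Nat) : Int)
      = ∑ b ∈ Finset.Ico 1 c, ∑ a ∈ Finset.Ico 0 b, if f a + f b = v then 1 else 0 := by
  have hfb : ∀ (L : List Int) (h : Int → List Int),
      (((L.flatMap h).count v : Nat) : Int)
        = (L.map (fun b => (((h b).count v : Nat) : Int))).sum := by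
    intro L h
    induction L with
    | nil => simp
    | cons x t iht =>
      rw [List.flatMap_cons, List.count_append, Nat.cast_add, List.map_cons, List.sum_cons, iht]
  unfold pvPairList
  rw [hfb, sum_map_pyRange]
  exact Finset.sum_congr rfl fun b _ => count_map_pyRange (fun a => f a + f b) v 0 b

lemma sum_Ico_guard (n l u : Int) (hl : 0 ≤ l) (hu : u ≤ n) (g : Int → Int) :
    (∑ y ∈ Finset.Ico l u, g y) = ∑ y ∈ Finset.Ico 0 n, if l ≤ y ∧ y < u then g y else 0 := by
  rw [← Finset.sum_filter]
  apply Finset.sum_congr _ (fun _ _ => rfl)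
  ext y
  simp only [Finset.mem_filter, Finset.mem_Ico]
  omega

lemma sum_Ico_extend (n l u : Int) (hl : 0 ≤ l) (hu : u ≤ n) (g : Int → Int)
    (hz : ∀ y, 0 ≤ y → y < n → ¬(l ≤ y ∧ y < u) → g y = 0) :
    (∑ y ∈ Finset.Ico l u, g y) = ∑ y ∈ Finset.Ico 0 n, g y := by
  rw [sum_Ico_guard n l u hl hu g]
  apply Finset.sum_congr rfl
  intro y hy
  simp only [Finset.mem_Ico] at hy
  by_cases h : l ≤ y ∧ y < u
  · rw [if_pos h]
  · rw [if_neg h, hz y hy.1 hy.2 h]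

lemma sum4_swap (s : Finset Int) (F : Int → Int → Int → Int → Int) :
    (∑ a ∈ s, ∑ b ∈ s, ∑ c ∈ s, ∑ d ∈ s, F a b c d)
      = ∑ c ∈ s, ∑ d ∈ s, ∑ b ∈ s, ∑ a ∈ s, F a b c d := by
  have swap : ∀ (G : Int → Int → Int), (∑ x ∈ s, ∑ y ∈ s, G x y) = ∑ y ∈ s, ∑ x ∈ s, G x y :=
    fun G => Finset.sum_comm
  calc
    (∑ a ∈ s, ∑ b ∈ s, ∑ c ∈ s, ∑ d ∈ s, F a b c d)
        = ∑ a ∈ s, ∑ c ∈ s, ∑ b ∈ s, ∑ d ∈ s, F a b c d :=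
          Finset.sum_congr rfl fun a _ => swap _
    _ = ∑ a ∈ s, ∑ c ∈ s, ∑ d ∈ s, ∑ b ∈ s, F a b c d :=
          Finset.sum_congr rfl fun a _ => Finset.sum_congr rfl fun c _ => swap _
    _ = ∑ c ∈ s, ∑ a ∈ s, ∑ d ∈ s, ∑ b ∈ s, F a b c d := swap _
    _ = ∑ c ∈ s, ∑ d ∈ s, ∑ a ∈ s, ∑ b ∈ s, F a b c d :=
          Finset.sum_congr rfl fun c _ => swap _
    _ = ∑ c ∈ s, ∑ d ∈ s, ∑ b ∈ s, ∑ a ∈ s, F a b c d :=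
          Finset.sum_congr rfl fun c _ => Finset.sum_congr rfl fun d _ => swap _

lemma pvAstep_getD (f : Int → Int) (n : Int) (st : PySem.Dict Int Int × Int) (c v : Int) :
    (pvAstep f n st c).1.getD v 0
      = st.1.getD v 0
        + ((((PySem.List.pyRange 0 (c - 1)).map (fun a => f a + f (c - 1))).count v : Nat) : Int) := by
  have h1 : (pvAstep f n st c).1
      = ((PySem.List.pyRange 0 (c - 1)).map (fun a => f a + f (c - 1))).foldl
          (fun (d : PySem.Dict Int Int) (x : Int) => d.insert x (d.getD x 0 + 1)) st.1 := by
    rw [List.foldl_map]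
    rfl
  rw [h1, PySem.Dict.getD_foldl_insert_add_one]

lemma pvAstep_snd (f : Int → Int) (n : Int) (st : PySem.Dict Int Int × Int) (c : Int) :
    (pvAstep f n st c).2
      = (PySem.List.pyRange (c + 1) n).foldl
          (fun tot d => tot + (pvAstep f n st c).1.getD (f d - f c) 0) st.2 := rfl

lemma pvAstep_fold (f : Int → Int) (n : Int) (j : Nat) :
    (∀ v : Int,
      ((PySem.List.pyRange 2 (2 + (j : Int))).foldl (pvAstep f n)
          ((PySem.Dict.empty : PySem.Dict Int Int), (0 : Int))).1.getD v 0
        = (((pvPairList f (1 + (j : Int))).count v : Nat) : Int))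
    ∧ ((PySem.List.pyRange 2 (2 + (j : Int))).foldl (pvAstep f n)
          ((PySem.Dict.empty : PySem.Dict Int Int), (0 : Int))).2
        = ((PySem.List.pyRange 2 (2 + (j : Int))).map (fun c =>
            ((PySem.List.pyRange (c + 1) n).map (fun d =>
              (((pvPairList f c).count (f d - f c) : Nat) : Int))).sum)).sum := by
  induction j with
  | zero =>
    have h2 : (2 : Int) + ((0 : Nat) : Int) = 2 := by norm_num
    have h1 : (1 : Int) + ((0 : Nat) : Int) = 1 := by norm_num
    rw [h2, h1, pyRange_one_empty (le_refl (2 : Int))]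
    constructor
    · intro v
      have hnil : pvPairList f 1 = [] := by
        unfold pvPairList; rw [pyRange_one_empty (le_refl (1 : Int))]; rfl
      simp [hnil, PySem.Dict.getD_empty]
    · simp
  | succ j ih =>
    obtain ⟨ih1, ih2⟩ := ih
    have hk : (2 : Int) + ((j + 1 : Nat) : Int) = (2 + (j : Int)) + 1 := by push_cast; ring
    have hk1 : (1 : Int) + ((j + 1 : Nat) : Int) = (1 + (j : Int)) + 1 := by push_cast; ring
    rw [hk, hk1, PySem.List.pyRange_one_succ_right (by omega : (2 : Int) ≤ 2 + (j : Int)),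
      List.foldl_append, List.foldl_cons, List.foldl_nil]
    set P := (PySem.List.pyRange 2 (2 + (j : Int))).foldl (pvAstep f n)
        ((PySem.Dict.empty : PySem.Dict Int Int), (0 : Int)) with hPdef
    have hPL : pvPairList f ((1 + (j : Int)) + 1)
        = pvPairList f (1 + (j : Int))
          ++ ((PySem.List.pyRange 0 (1 + (j : Int))).map (fun a => f a + f (1 + (j : Int)))) := by
      unfold pvPairList
      rw [PySem.List.pyRange_one_succ_right (by omega : (1 : Int) ≤ 1 + (j : Int)),
        List.flatMap_append]
      simp
    have hb1 : (2 + (j : Int)) - 1 = 1 + (j : Int) := by ring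
    have hgd : ∀ v : Int, (pvAstep f n P (2 + (j : Int))).1.getD v 0
        = (((pvPairList f ((1 + (j : Int)) + 1)).count v : Nat) : Int) := by
      intro v
      rw [pvAstep_getD, hb1, ih1 v, hPL, List.count_append]
      push_cast
      ring
    refine ⟨fun v => hgd v, ?_⟩
    rw [List.map_append, List.sum_append, List.map_cons, List.map_nil, List.sum_cons,
      List.sum_nil, add_zero]
    rw [pvAstep_snd, PySem.List.foldl_add, ih2]
    congr 1
    have hfun : (fun d => (pvAstep f n P (2 + (j : Int))).1.getD (f d - f (2 + (j : Int))) 0)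
        = (fun d => (((pvPairList f (2 + (j : Int))).count (f d - f (2 + (j : Int))) : Nat) : Int)) := by
      funext d
      rw [hgd (f d - f (2 + (j : Int))), show (1 + (j : Int)) + 1 = 2 + (j : Int) from by ring]
    rw [hfun]

lemma stepA_a (f : Int → Int) (n b c d : Int) (hbn : b ≤ n) (hbc : b < c) (hcd : c < d) :
    (∑ a ∈ Finset.Ico 0 b, if f a + f b = f d - f c then (1 : Int) else 0)
      = ∑ a ∈ Finset.Ico 0 n, pvG4 f a b c d := by
  rw [sum_Ico_guard n 0 b le_rfl hbn]
  refine Finset.sum_congr rfl fun a ha => ?_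
  simp only [Finset.mem_Ico] at ha
  unfold pvG4
  by_cases h : 0 ≤ a ∧ a < b
  · rw [if_pos h]
    exact if_congr ⟨fun he => ⟨h.2, hbc, hcd, by omega⟩, fun he => by omega⟩ rfl rfl
  · rw [if_neg h, if_neg (by rintro ⟨h1, -, -, -⟩; omega)]

lemma stepA_b (f : Int → Int) (n c d : Int) (hcn : c ≤ n) :
    (∑ b ∈ Finset.Ico 1 c, ∑ a ∈ Finset.Ico 0 n, pvG4 f a b c d)
      = ∑ b ∈ Finset.Ico 0 n, ∑ a ∈ Finset.Ico 0 n, pvG4 f a b c d := by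
  apply sum_Ico_extend n 1 c (by omega) hcn
  intro b hb0 hbn hnot
  refine Finset.sum_eq_zero fun a ha => ?_
  simp only [Finset.mem_Ico] at ha
  unfold pvG4
  rw [if_neg (by rintro ⟨h1, h2, -, -⟩; omega)]

lemma stepA_d (f : Int → Int) (n c : Int) (hc0 : 0 ≤ c) :
    (∑ d ∈ Finset.Ico (c + 1) n, ∑ b ∈ Finset.Ico 0 n, ∑ a ∈ Finset.Ico 0 n, pvG4 f a b c d)
      = ∑ d ∈ Finset.Ico 0 n, ∑ b ∈ Finset.Ico 0 n, ∑ a ∈ Finset.Ico 0 n, pvG4 f a b c d := by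
  apply sum_Ico_extend n (c + 1) n (by omega) le_rfl
  intro d hd0 hdn hnot
  refine Finset.sum_eq_zero fun b _ => Finset.sum_eq_zero fun a _ => ?_
  unfold pvG4
  rw [if_neg (by rintro ⟨-, -, h3, -⟩; omega)]

lemma stepA_c (f : Int → Int) (n : Int) :
    (∑ c ∈ Finset.Ico 2 (n - 1), ∑ d ∈ Finset.Ico 0 n, ∑ b ∈ Finset.Ico 0 n,
        ∑ a ∈ Finset.Ico 0 n, pvG4 f a b c d)
      = pvCube f n := by
  unfold pvCube
  apply sum_Ico_extend n 2 (n - 1) (by omega) (by omega)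
  intro c hc0 hcn hnot
  refine Finset.sum_eq_zero fun d hd => Finset.sum_eq_zero fun b hb =>
    Finset.sum_eq_zero fun a ha => ?_
  simp only [Finset.mem_Ico] at hd hb ha
  unfold pvG4
  rw [if_neg (by rintro ⟨h1, h2, h3, -⟩; omega)]

lemma A_eq_cube (f : Int → Int) (n : Int) (hn : 4 ≤ n) :
    ((PySem.List.pyRange 2 (n - 1)).foldl (pvAstep f n)
        ((PySem.Dict.empty : PySem.Dict Int Int), (0 : Int))).2 = pvCube f n := by
  obtain ⟨-, h2⟩ := pvAstep_fold f n ((n - 3).toNat)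
  have hc3 : (((n - 3).toNat : Nat) : Int) = n - 3 := by omega
  rw [hc3, show (2 : Int) + (n - 3) = n - 1 from by ring] at h2
  rw [h2, sum_map_pyRange]
  calc
    (∑ c ∈ Finset.Ico 2 (n - 1), ((PySem.List.pyRange (c + 1) n).map (fun d =>
        (((pvPairList f c).count (f d - f c) : Nat) : Int))).sum)
        = ∑ c ∈ Finset.Ico 2 (n - 1), ∑ d ∈ Finset.Ico 0 n, ∑ b ∈ Finset.Ico 0 n,
            ∑ a ∈ Finset.Ico 0 n, pvG4 f a b c d := by
          refine Finset.sum_congr rfl fun c hc => ?_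
          simp only [Finset.mem_Ico] at hc
          rw [sum_map_pyRange]
          calc
            (∑ d ∈ Finset.Ico (c + 1) n,
                (((pvPairList f c).count (f d - f c) : Nat) : Int))
                = ∑ d ∈ Finset.Ico (c + 1) n, ∑ b ∈ Finset.Ico 0 n,
                    ∑ a ∈ Finset.Ico 0 n, pvG4 f a b c d := by
                  refine Finset.sum_congr rfl fun d hd => ?_
                  simp only [Finset.mem_Ico] at hd
                  rw [count_pvPairList]
                  calc
                    (∑ b ∈ Finset.Ico 1 c, ∑ a ∈ Finset.Ico 0 b,
                        if f a + f b = f d - f c then (1 : Int) else 0)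
                        = ∑ b ∈ Finset.Ico 1 c, ∑ a ∈ Finset.Ico 0 n, pvG4 f a b c d := by
                          refine Finset.sum_congr rfl fun b hb => ?_
                          simp only [Finset.mem_Ico] at hb
                          exact stepA_a f n b c d (by omega) (by omega) (by omega)
                    _ = ∑ b ∈ Finset.Ico 0 n, ∑ a ∈ Finset.Ico 0 n, pvG4 f a b c d :=
                          stepA_b f n c d (by omega)
            _ = ∑ d ∈ Finset.Ico 0 n, ∑ b ∈ Finset.Ico 0 n,
                  ∑ a ∈ Finset.Ico 0 n, pvG4 f a b c d := stepA_d f n c (by omega)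
    _ = pvCube f n := stepA_c f n

lemma stepB_d (f : Int → Int) (n a b c : Int) (ha0 : 0 ≤ a) (hab : a < b) (hbc : b < c) :
    (∑ d ∈ Finset.Ico (c + 1) n, if f a + f b + f c = f d then (1 : Int) else 0)
      = ∑ d ∈ Finset.Ico 0 n, pvG4 f a b c d := by
  rw [sum_Ico_guard n (c + 1) n (by omega) le_rfl]
  refine Finset.sum_congr rfl fun d hd => ?_
  simp only [Finset.mem_Ico] at hd
  unfold pvG4
  by_cases h : c + 1 ≤ d ∧ d < n
  · rw [if_pos h]
    exact if_congr ⟨fun he => ⟨hab, hbc, by omega, he⟩, fun he => he.2.2.2⟩ rfl rfl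
  · rw [if_neg h, if_neg (by rintro ⟨-, -, h3, -⟩; omega)]

lemma stepB_c (f : Int → Int) (n a b : Int) (hb0 : 0 ≤ b) :
    (∑ c ∈ Finset.Ico (b + 1) n, ∑ d ∈ Finset.Ico 0 n, pvG4 f a b c d)
      = ∑ c ∈ Finset.Ico 0 n, ∑ d ∈ Finset.Ico 0 n, pvG4 f a b c d := by
  apply sum_Ico_extend n (b + 1) n (by omega) le_rfl
  intro c hc0 hcn hnot
  refine Finset.sum_eq_zero fun d _ => ?_
  unfold pvG4
  rw [if_neg (by rintro ⟨-, h2, -, -⟩; omega)]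

lemma stepB_b (f : Int → Int) (n a : Int) (ha0 : 0 ≤ a) :
    (∑ b ∈ Finset.Ico (a + 1) n, ∑ c ∈ Finset.Ico 0 n, ∑ d ∈ Finset.Ico 0 n, pvG4 f a b c d)
      = ∑ b ∈ Finset.Ico 0 n, ∑ c ∈ Finset.Ico 0 n, ∑ d ∈ Finset.Ico 0 n, pvG4 f a b c d := by
  apply sum_Ico_extend n (a + 1) n (by omega) le_rfl
  intro b hb0 hbn hnot
  refine Finset.sum_eq_zero fun c _ => Finset.sum_eq_zero fun d _ => ?_
  unfold pvG4
  rw [if_neg (by rintro ⟨h1, -, -, -⟩; omega)]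

lemma B_eq_cube (f : Int → Int) (n : Int) :
    (PySem.List.pyRange 0 n).foldl (fun tot a =>
      (PySem.List.pyRange (a + 1) n).foldl (fun tot b =>
        (PySem.List.pyRange (b + 1) n).foldl (fun tot c =>
          (PySem.List.pyRange (c + 1) n).foldl (fun tot d =>
            if f a + f b + f c = f d then tot + 1 else tot) tot) tot) tot) 0 = pvCube f n := by
  simp only [PySem.List.foldl_ite_add_one, PySem.List.foldl_add, zero_add]
  rw [sum_map_pyRange]
  calc
    (∑ a ∈ Finset.Ico 0 n, ((PySem.List.pyRange (a + 1) n).map (fun b =>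
        ((PySem.List.pyRange (b + 1) n).map (fun c =>
          (((PySem.List.pyRange (c + 1) n).countP
            (fun d => decide (f a + f b + f c = f d)) : Nat) : Int))).sum)).sum)
        = ∑ a ∈ Finset.Ico 0 n, ∑ b ∈ Finset.Ico 0 n, ∑ c ∈ Finset.Ico 0 n,
            ∑ d ∈ Finset.Ico 0 n, pvG4 f a b c d := by
          refine Finset.sum_congr rfl fun a ha => ?_
          simp only [Finset.mem_Ico] at ha
          rw [sum_map_pyRange]
          calc
            (∑ b ∈ Finset.Ico (a + 1) n, ((PySem.List.pyRange (b + 1) n).map (fun c =>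
                (((PySem.List.pyRange (c + 1) n).countP
                  (fun d => decide (f a + f b + f c = f d)) : Nat) : Int))).sum)
                = ∑ b ∈ Finset.Ico (a + 1) n, ∑ c ∈ Finset.Ico 0 n,
                    ∑ d ∈ Finset.Ico 0 n, pvG4 f a b c d := by
                  refine Finset.sum_congr rfl fun b hb => ?_
                  simp only [Finset.mem_Ico] at hb
                  rw [sum_map_pyRange]
                  calc
                    (∑ c ∈ Finset.Ico (b + 1) n,
                        (((PySem.List.pyRange (c + 1) n).countP
                          (fun d => decide (f a + f b + f c = f d)) : Nat) : Int))
                        = ∑ c ∈ Finset.Ico (b + 1) n, ∑ d ∈ Finset.Ico 0 n, pvG4 f a b c d := by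
                          refine Finset.sum_congr rfl fun c hc => ?_
                          simp only [Finset.mem_Ico] at hc
                          rw [countP_pyRange (fun d => f a + f b + f c = f d) (c + 1) n]
                          exact stepB_d f n a b c (by omega) (by omega) (by omega)
                    _ = ∑ c ∈ Finset.Ico 0 n, ∑ d ∈ Finset.Ico 0 n, pvG4 f a b c d :=
                          stepB_c f n a b (by omega)
            _ = ∑ b ∈ Finset.Ico 0 n, ∑ c ∈ Finset.Ico 0 n,
                  ∑ d ∈ Finset.Ico 0 n, pvG4 f a b c d := stepB_b f n a (by omega)
    _ = pvCube f n := by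
          unfold pvCube
          exact sum4_swap (Finset.Ico 0 n) (pvG4 f)

lemma cube_eq_zero_of_small (f : Int → Int) (n : Int) (hn : n < 4) : pvCube f n = 0 := by
  unfold pvCube
  refine Finset.sum_eq_zero fun c hc => Finset.sum_eq_zero fun d hd =>
    Finset.sum_eq_zero fun b hb => Finset.sum_eq_zero fun a ha => ?_
  simp only [Finset.mem_Ico] at hc hd hb ha
  unfold pvG4
  rw [if_neg (by rintro ⟨h1, h2, h3, -⟩; omega)]

-- ===== VERDICT (by name: the statement is the Claim_ definition above) =====
theorem special_quadruplets_spec : Claim_equal_special_quadruplets := by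
  intro nums _
  show special_quadruplets nums = special_quadruplets_alt nums
  have hB : special_quadruplets_alt nums
      = pvCube (fun i => PySem.List.pyGetD nums i 0) ((nums.length : Int)) := by
    unfold special_quadruplets_alt
    exact B_eq_cube (fun i => PySem.List.pyGetD nums i 0) ((nums.length : Int))
  by_cases h4 : ((nums.length : Int)) < 4
  · have hA : special_quadruplets nums = 0 := by
      simp only [special_quadruplets]
      rw [if_pos h4]
    rw [hA, hB, cube_eq_zero_of_small _ _ h4]
  · rw [hB]
    simp only [special_quadruplets]
    rw [if_neg h4]
    exact A_eq_cube (fun i => PySem.List.pyGetD nums i 0) ((nums.length : Int)) (by omega)
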